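-- pv_equiv track=rewrite | github.com/daniel-reich/ubiquitous-fiesta | HaxQfQTEpo7BFE5rz_5.py | alternate_pos_neg
-- ===== SOURCE A (Python) =====
-- def alternate_pos_neg(lst):
--   if lst[0]==0:
--     return False
--   flg=False
--   for i in range(len(lst)-1):
--     if lst[i]==0 or lst[i+1]==0:
--       flg=True
--     if lst[i]>0 and lst[i+1]>0 or lst[i]<0 and lst[i+1]<0:
--       flg=True
--
--   if flg==True:
--     return False
--   else:
--     return True
-- ===== SOURCE B (Python) =====
-- def alternate_pos_neg(lst):
--     if lst[0] == 0:
--         return False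
--     evens = lst[0::2]
--     odds = lst[1::2]
--     return (all(x > 0 for x in evens) and all(x < 0 for x in odds)) \
--         or (all(x < 0 for x in evens) and all(x > 0 for x in odds))
-- ===== Notes on version B (the rewrite author's own statement) =====
-- stated objective: alternative
-- what changed: Replaces the adjacent-pair scan with two uniform-sign checks over the even-index and odd-index subsequences (lst[0::2] / lst[1::2]): the list alternates iff one parity class is all positive and the other all negative.
import Mathlib
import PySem

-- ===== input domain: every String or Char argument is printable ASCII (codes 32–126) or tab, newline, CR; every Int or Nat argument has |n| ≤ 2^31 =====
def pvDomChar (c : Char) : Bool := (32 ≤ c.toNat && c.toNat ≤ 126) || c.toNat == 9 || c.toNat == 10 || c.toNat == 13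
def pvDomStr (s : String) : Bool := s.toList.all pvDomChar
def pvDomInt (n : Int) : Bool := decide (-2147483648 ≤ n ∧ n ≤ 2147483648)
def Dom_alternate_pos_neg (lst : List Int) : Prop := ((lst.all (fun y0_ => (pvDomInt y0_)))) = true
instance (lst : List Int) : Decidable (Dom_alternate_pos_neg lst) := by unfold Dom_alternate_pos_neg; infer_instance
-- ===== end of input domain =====

-- B replaces A's adjacent-pair scan with two uniform-sign checks over the index-parity
-- subsequences lst[0::2] / lst[1::2] (objective: alternative algorithm, same cost).

-- ===== PORT A =====
def alternate_pos_neg (lst : List Int) : Bool :=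
  -- the first-element access raises IndexError on the empty list; excluded by Pre_, so pyGetD's default is never read
  if PySem.List.pyGetD lst 0 0 == 0 then false
  else
    let flg := (PySem.List.pyRange 0 ((lst.length : Int) - 1) 1).foldl
      (fun flg i =>
        let flg := if PySem.List.pyGetD lst i 0 == 0 || PySem.List.pyGetD lst (i + 1) 0 == 0 then true else flg
        let flg := if (PySem.List.pyGetD lst i 0 > 0 && PySem.List.pyGetD lst (i + 1) 0 > 0)
                      || (PySem.List.pyGetD lst i 0 < 0 && PySem.List.pyGetD lst (i + 1) 0 < 0) then true else flg
        flg) false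
    if flg == true then false else true

-- ===== PORT B =====
-- hand port of the extended slice xs[::2] (PySem.List.slice has no step): elements at even indices; exact
def pvEvery2 : List Int → List Int
  | [] => []
  | [x] => [x]
  | x :: _ :: xs => x :: pvEvery2 xs

def alternate_pos_neg_alt (lst : List Int) : Bool :=
  -- the first-element access raises IndexError on the empty list; excluded by Pre_, so pyGetD's default is never read
  if PySem.List.pyGetD lst 0 0 == 0 then false
  else
    let evens := pvEvery2 lst          -- lst[0::2]
    let odds := pvEvery2 lst.tail      -- lst[1::2]
    (evens.all (fun x => decide (0 < x)) && odds.all (fun x => decide (x < 0)))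
      || (evens.all (fun x => decide (x < 0)) && odds.all (fun x => decide (0 < x)))

-- ===== PRECONDITION & SPEC =====
-- Pre_ excludes only the empty list, on which both Pythons raise IndexError at the first-element access.
def Pre_alternate_pos_neg (lst : List Int) : Prop := lst ≠ []
instance (lst : List Int) : Decidable (Pre_alternate_pos_neg lst) := by unfold Pre_alternate_pos_neg; infer_instance
def pvWitness_alternate_pos_neg : List Int := ([1, -2, 3])

def Spec_alternate_pos_neg (lst : List Int) (out : Bool) : Prop := out = alternate_pos_neg_alt lst
instance (lst : List Int) (out : Bool) : Decidable (Spec_alternate_pos_neg lst out) := by unfold Spec_alternate_pos_neg; infer_instance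

-- ===== CLAIM (what is proved, stated in full; the proofs are below) =====
def Claim_equal_alternate_pos_neg : Prop := ∀ (lst : List Int), Dom_alternate_pos_neg lst → Pre_alternate_pos_neg lst → Spec_alternate_pos_neg lst (alternate_pos_neg lst)

-- ===== LEMMAS AND PROOFS =====

-- one adjacent pair is "bad" (A sets flg) iff it is NOT a nonzero sign alternation
def pvBad (a b : Int) : Bool :=
  (a == 0 || b == 0) || ((a > 0 && b > 0) || (a < 0 && b < 0))

-- the pairwise scan as a structural recursion along the list
def pvChain : Int → List Int → Bool
  | _, [] => true
  | x, y :: ys => !pvBad x y && pvChain y ys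

theorem pvEvery2_cons (x : Int) (rest : List Int) :
    pvEvery2 (x :: rest) = x :: pvEvery2 rest.tail := by
  cases rest <;> rfl

-- A's loop body, combined: flg' = flg || pvBad a b
theorem pvStep_eq (a b : Int) (flg : Bool) :
    (if (a > 0 && b > 0) || (a < 0 && b < 0) then true
     else if a == 0 || b == 0 then true else flg)
    = if pvBad a b then true else flg := by
  unfold pvBad
  split_ifs <;> (simp_all; try omega)

-- Nat-indexed characterisation of A's scan as pvChain
theorem pvAny_eq_chain (rest : List Int) : ∀ (x : Int),
    ((List.range rest.length).any
      (fun k => pvBad ((x :: rest).getD k 0) ((x :: rest).getD (k + 1) 0)))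
    = !pvChain x rest := by
  induction rest with
  | nil => intro x; simp [pvChain]
  | cons y ys ih =>
    intro x
    have h := ih y
    simp only [List.length_cons, List.range_succ_eq_map, List.any_cons, List.any_map,
      Function.comp_def, Nat.succ_eq_add_one, List.getD_cons_zero, List.getD_cons_succ] at h ⊢
    rw [h]
    simp only [pvChain]
    cases pvBad x y <;> cases pvChain y ys <;> simp

-- the parity characterisation of pvChain, for a nonzero first element
theorem pvChain_eq_parity (rest : List Int) : ∀ (x : Int), x ≠ 0 →
    pvChain x rest
    = ((decide (0 < x) && (pvEvery2 rest).all (fun z => decide (z < 0))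
          && (pvEvery2 rest.tail).all (fun z => decide (0 < z)))
       || (decide (x < 0) && (pvEvery2 rest).all (fun z => decide (0 < z))
          && (pvEvery2 rest.tail).all (fun z => decide (z < 0)))) := by
  induction rest with
  | nil =>
    intro x hx
    have : 0 < x ∨ x < 0 := by omega
    rcases this with h | h <;> simp [pvChain, pvEvery2, h]
  | cons y ys ih =>
    intro x hx
    rw [pvEvery2_cons]
    simp only [List.tail_cons, List.all_cons]
    by_cases hy : y = 0
    · subst hy
      simp [pvChain, pvBad]
    · rw [pvChain, ih y hy]
      have hx' : 0 < x ∨ x < 0 := by omega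
      have hy' : 0 < y ∨ y < 0 := by omega
      rcases hx' with h1 | h1 <;> rcases hy' with h2 | h2
      · simp [pvBad, h1, h2, show ¬ x < 0 by omega, show ¬ y < 0 by omega]
      · simp [pvBad, h1, h2, show ¬ x < 0 by omega, show ¬ 0 < y by omega,
          Bool.and_comm, Bool.and_assoc]
        rw [show (y == 0) = false by simp [hy], show (x == 0) = false by simp [hx]]
        simp
      · simp [pvBad, h1, h2, show ¬ 0 < x by omega, show ¬ y < 0 by omega,
          Bool.and_comm, Bool.and_assoc]
        rw [show (y == 0) = false by simp [hy], show (x == 0) = false by simp [hx]]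
        simp
      · simp [pvBad, h1, h2, show ¬ 0 < x by omega, show ¬ 0 < y by omega]

-- ===== VERDICT (by name: the statement is the Claim_ definition above) =====
set_option maxHeartbeats 1000000 in
theorem alternate_pos_neg_spec : Claim_equal_alternate_pos_neg := by
  intro lst _hdom hpre
  unfold Spec_alternate_pos_neg alternate_pos_neg alternate_pos_neg_alt
  obtain ⟨x, rest, rfl⟩ : ∃ x rest, lst = x :: rest := by
    cases lst with
    | nil => exact absurd rfl hpre
    | cons x rest => exact ⟨x, rest, rfl⟩
  by_cases hx0 : x = 0
  · subst hx0; simp [PySem.List.pyGetD_zero_cons]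
  · rw [PySem.List.pyGetD_zero_cons]
    rw [if_neg (show ¬ ((x == 0) = true) by simp [hx0]),
        if_neg (show ¬ ((x == 0) = true) by simp [hx0])]
    rw [show ((x :: rest).length : Int) - 1 = ((rest.length : Nat) : Int) by simp]
    rw [PySem.List.pyRange_zero_natCast, List.foldl_map]
    have hfold :
        (List.range rest.length).foldl
          (fun flg (k : Nat) =>
            let f1 := if PySem.List.pyGetD (x :: rest) (↑k) 0 == 0 || PySem.List.pyGetD (x :: rest) ((↑k) + 1) 0 == 0 then true else flg
            let f2 := if (PySem.List.pyGetD (x :: rest) (↑k) 0 > 0 && PySem.List.pyGetD (x :: rest) ((↑k) + 1) 0 > 0)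
                         || (PySem.List.pyGetD (x :: rest) (↑k) 0 < 0 && PySem.List.pyGetD (x :: rest) ((↑k) + 1) 0 < 0) then true else f1
            f2) false
        = ((List.range rest.length).any
            (fun k => pvBad ((x :: rest).getD k 0) ((x :: rest).getD (k + 1) 0))) := by
      rw [PySem.List.foldl_congr_mem _ _ (fun flg (k : Nat) =>
            if pvBad ((x :: rest).getD k 0) ((x :: rest).getD (k + 1) 0) then true else flg) _ ?_]
      · rw [PySem.List.foldl_if_true_eq]
        simp
      · intro acc k _
        have h2 : PySem.List.pyGetD (x :: rest) (((k : Nat) : Int) + 1) 0 = (x :: rest).getD (k + 1) 0 := by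
          rw [show (((k : Nat) : Int) + 1) = (((k + 1 : Nat) : Nat) : Int) by push_cast; ring]
          exact PySem.List.pyGetD_natCast ..
        simp only [PySem.List.pyGetD_natCast, h2]
        exact pvStep_eq ((x :: rest).getD k 0) ((x :: rest).getD (k + 1) 0) acc
    rw [hfold, pvAny_eq_chain rest x, pvChain_eq_parity rest x hx0, pvEvery2_cons]
    clear hfold _hdom hpre
    simp only [List.tail_cons, List.all_cons]
    cases hp : decide (0 < x) <;> cases hq : decide (x < 0) <;>
      cases hA : (pvEvery2 rest).all (fun z => decide (z < 0)) <;>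
      cases hB : (pvEvery2 rest).all (fun z => decide (0 < z)) <;>
      cases hC : (pvEvery2 rest.tail).all (fun z => decide (z < 0)) <;>
      cases hD : (pvEvery2 rest.tail).all (fun z => decide (0 < z)) <;>
      simp_all
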